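-- pv_equiv track=rewrite | github.com/Ranjithgopi25/PowerBi-Dashboard | edit_content_prompt.py | _collect_selected_prompts
-- ===== SOURCE A (Python) =====
-- from typing import Sequence
--
-- def _normalize_editor_type(editor_type: str) -> str | None:
--     """Normalize editor type identifier to standard key (validates against frontend standardized values)"""
--     if not editor_type:
--         return None
--
--     if not isinstance(editor_type, str):
--         return None
--
--     normalized = editor_type.lower().strip()
--     valid_types = {'development', 'content', 'line', 'copy', 'brand-alignment'}
--
--     return normalized if normalized in valid_types else None
--
-- def _collect_selected_prompts(editor_types: Sequence[str], editor_prompts: dict[str, str]) -> list[str]: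
--     """Collect prompts for selected editor types, preventing duplicates"""
--     selected = []
--     seen_types = set()
--
--     for editor_type in editor_types:
--         normalized = _normalize_editor_type(editor_type)
--         if normalized and normalized in editor_prompts and normalized not in seen_types:
--             selected.append(editor_prompts[normalized])
--             seen_types.add(normalized)
--
--     return selected
-- ===== SOURCE B (Python) =====
-- def _normalize_editor_type(editor_type):
--     """Normalize editor type identifier to standard key (validates against frontend standardized values)"""
--     if not editor_type:
--         return None
--     if not isinstance(editor_type, str):
--         return None
--     normalized = editor_type.lower().strip()
--     valid_types = {'development', 'content', 'line', 'copy', 'brand-alignment'}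
--     return normalized if normalized in valid_types else None
--
--
-- _VALID_TYPES = ('development', 'content', 'line', 'copy', 'brand-alignment')
--
--
-- def _collect_selected_prompts(editor_types, editor_prompts):
--     """Collect prompts for selected editor types, preventing duplicates.
--
--     Inverted traversal: instead of scanning editor_types and deduplicating with a
--     seen-set, scan the five candidate keys, record the first-occurrence position of
--     each requested key that has a prompt, and order the prompts by that position.
--     """
--     normalized = [_normalize_editor_type(e) for e in editor_types]
--     hits = []
--     for key in _VALID_TYPES:
--         if key in editor_prompts and key in normalized:
--             hits.append((normalized.index(key), editor_prompts[key]))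
--     hits.sort(key=lambda hit: hit[0])
--     return [prompt for _, prompt in hits]
-- ===== Notes on version B (the rewrite author's own statement) =====
-- stated objective: alternative
-- what changed: Inverts the traversal: instead of one pass over editor_types threading a seen_types set, B scans the five fixed candidate keys, records the first-occurrence index of each requested key that has a prompt (list.index on the normalized list), and sorts the hits by that index to recover the first-occurrence output order.
import Mathlib
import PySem

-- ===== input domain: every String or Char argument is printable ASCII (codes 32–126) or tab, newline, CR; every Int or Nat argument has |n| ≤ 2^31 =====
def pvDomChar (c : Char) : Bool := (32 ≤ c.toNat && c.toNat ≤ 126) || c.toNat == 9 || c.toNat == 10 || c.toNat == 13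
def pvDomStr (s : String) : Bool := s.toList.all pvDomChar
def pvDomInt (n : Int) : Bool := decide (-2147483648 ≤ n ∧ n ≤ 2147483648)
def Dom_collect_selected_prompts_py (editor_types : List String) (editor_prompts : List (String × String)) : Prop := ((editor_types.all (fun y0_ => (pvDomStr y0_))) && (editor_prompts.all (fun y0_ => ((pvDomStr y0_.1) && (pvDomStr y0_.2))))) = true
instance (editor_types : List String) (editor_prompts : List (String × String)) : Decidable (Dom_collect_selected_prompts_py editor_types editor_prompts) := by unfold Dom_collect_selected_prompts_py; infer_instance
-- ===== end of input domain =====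

-- B inverts the traversal: A scans editor_types once threading a seen_types set; B scans the
-- five fixed candidate keys, records each requested key's first-occurrence index, and sorts
-- the hits by that index. Same return value, proved below.


-- ===== PORT A =====
-- shared module helper _normalize_editor_type (the isinstance check is always true for a String)
-- 'normalized if normalized in valid_types else None'
def pvValidate (normalized : String) : Option String :=
  if normalized = "development" ∨ normalized = "content" ∨ normalized = "line" ∨
     normalized = "copy" ∨ normalized = "brand-alignment"
  then some normalized else none

def pvNormalizeEditorType (editor_type : String) : Option String :=
  if PySem.Str.len editor_type = 0 then none
  else pvValidate (PySem.Str.strip (PySem.Str.lower editor_type))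

-- A's loop body: 'if normalized and normalized in editor_prompts and normalized not in seen_types'
def pvStepA (d : PySem.Dict String String) (st : List String × PySem.Set String) (e : String) :
    List String × PySem.Set String :=
  match pvNormalizeEditorType e with
  | none => st
  | some n =>
    if n ≠ "" then
      match d.get? n with
      | some v => if st.2.contains n then st else (st.1 ++ [v], st.2.add n)
      | none => st
    else st

def collect_selected_prompts_py (editor_types : List String) (editor_prompts : List (String × String)) : List String :=
  (editor_types.foldl (pvStepA (PySem.Dict.mk editor_prompts)) ([], PySem.Set.empty)).1

-- ===== PORT B =====
-- the module constant _VALID_TYPES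
def pvValidList : List String := ["development", "content", "line", "copy", "brand-alignment"]

-- B's loop body: 'if key in editor_prompts and key in normalized:
--                     hits.append((normalized.index(key), editor_prompts[key]))'
def pvHit (d : PySem.Dict String String) (normalized : List (Option String)) (key : String) :
    Option (Int × String) :=
  match d.get? key with
  | none => none
  | some v =>
    match PySem.List.index? normalized (some key) with
    | none => none
    | some j => some ((j : Int), v)

def collect_selected_prompts_py_alt (editor_types : List String) (editor_prompts : List (String × String)) : List String :=
  let d := PySem.Dict.mk editor_prompts
  let normalized := editor_types.map pvNormalizeEditorType
  let hits := pvValidList.foldl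
    (fun hits key => match pvHit d normalized key with
      | some h => hits ++ [h]
      | none => hits) []
  (PySem.List.sorted hits (fun hit => hit.1)).map (fun hit => hit.2)

-- ===== PRECONDITION & SPEC =====
def Spec_collect_selected_prompts_py (editor_types : List String) (editor_prompts : List (String × String)) (out : List String) : Prop := out = collect_selected_prompts_py_alt editor_types editor_prompts
instance (editor_types : List String) (editor_prompts : List (String × String)) (out : List String) : Decidable (Spec_collect_selected_prompts_py editor_types editor_prompts out) := by unfold Spec_collect_selected_prompts_py; infer_instance

-- ===== CLAIM (what is proved, stated in full; the proofs are below) =====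
def Claim_equal_collect_selected_prompts_py : Prop := ∀ (editor_types : List String) (editor_prompts : List (String × String)), Dom_collect_selected_prompts_py editor_types editor_prompts → Spec_collect_selected_prompts_py editor_types editor_prompts (collect_selected_prompts_py editor_types editor_prompts)

-- ===== LEMMAS AND PROOFS =====

-- canonical description of the result: walk the normalized list with a position counter,
-- emitting (position, prompt) at each first occurrence of a key that has a prompt
def pvOcc (d : PySem.Dict String String) :
    List (Option String) → Nat → List (Option String) → List (Int × String)
  | [], _, _ => []
  | x :: rest, i, seen =>
    if x ∈ seen then pvOcc d rest (i + 1) seen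
    else ((x.bind d.get?).map (fun v => ((i : Int), v))).toList ++ pvOcc d rest (i + 1) (x :: seen)

lemma pvOcc_fst_ge (d : PySem.Dict String String) (ns : List (Option String)) :
    ∀ (i : Nat) (seen : List (Option String)) (p : Int × String),
      p ∈ pvOcc d ns i seen → (i : Int) ≤ p.1 := by
  induction ns with
  | nil => intro i seen p hp; simp [pvOcc] at hp
  | cons x rest ih =>
    intro i seen p hp
    simp only [pvOcc] at hp
    split_ifs at hp with hx
    · have := ih (i + 1) seen p hp; push_cast at this ⊢; omega
    · rcases List.mem_append.mp hp with h | h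
      · cases hb : x.bind d.get? with
        | none => rw [hb] at h; simp at h
        | some v => rw [hb] at h; simp at h; simp [h]
      · have := ih (i + 1) _ p h; push_cast at this ⊢; omega

lemma pvOcc_pairwise (d : PySem.Dict String String) (ns : List (Option String)) :
    ∀ (i : Nat) (seen : List (Option String)),
      (pvOcc d ns i seen).Pairwise (fun a b => a.1 < b.1) := by
  induction ns with
  | nil => intro i seen; simp [pvOcc]
  | cons x rest ih =>
    intro i seen
    simp only [pvOcc]
    split_ifs with hx
    · exact ih (i + 1) seen
    · cases hb : x.bind d.get? with
      | none => simpa using ih (i + 1) (x :: seen)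
      | some v =>
        simp only [Option.map_some, Option.toList_some, List.singleton_append]
        refine List.pairwise_cons.mpr ⟨?_, ih (i + 1) _⟩
        intro p hp
        have := pvOcc_fst_ge d rest (i + 1) _ p hp
        push_cast at this ⊢; omega

-- membership in pvOcc, phrased through index? on the whole remaining list
lemma pvOcc_mem (d : PySem.Dict String String) (ns : List (Option String)) :
    ∀ (i : Nat) (seen : List (Option String)) (p : Int × String),
      p ∈ pvOcc d ns i seen ↔
        ∃ (k : String) (j : Nat), some k ∉ seen ∧ d.get? k = some p.2 ∧
          PySem.List.index? ns (some k) = some j ∧ p.1 = (i : Int) + j := by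
  induction ns with
  | nil =>
    intro i seen p
    simp [pvOcc]
  | cons x rest ih =>
    intro i seen p
    simp only [pvOcc]
    split_ifs with hx
    · -- x already seen: no key k with some k ∉ seen equals x
      rw [ih (i + 1) seen p]
      constructor
      · rintro ⟨k, j, hk, hd, hidx, hp⟩
        have hne : x ≠ some k := by rintro rfl; exact hk hx
        refine ⟨k, j + 1, hk, hd, ?_, ?_⟩
        · rw [PySem.List.index?_cons_of_ne rest hne, hidx]; rfl
        · push_cast at hp ⊢; omega
      · rintro ⟨k, j, hk, hd, hidx, hp⟩
        have hne : x ≠ some k := by rintro rfl; exact hk hx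
        rw [PySem.List.index?_cons_of_ne rest hne] at hidx
        cases hj : PySem.List.index? rest (some k) with
        | none => rw [hj] at hidx; simp at hidx
        | some j' =>
          rw [hj] at hidx
          simp at hidx
          refine ⟨k, j', hk, hd, hj, ?_⟩
          push_cast at hp ⊢; omega
    · cases x with
      | none =>
        simp only [Option.bind_none, Option.map_none, Option.toList_none, List.nil_append]
        rw [ih (i + 1) _ p]
        constructor
        · rintro ⟨k, j, hk, hd, hidx, hp⟩
          have hk' : some k ∉ seen := fun h => hk (List.mem_cons_of_mem _ h)
          refine ⟨k, j + 1, hk', hd, ?_, ?_⟩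
          · rw [PySem.List.index?_cons_of_ne rest (by simp), hidx]; rfl
          · push_cast at hp ⊢; omega
        · rintro ⟨k, j, hk, hd, hidx, hp⟩
          rw [PySem.List.index?_cons_of_ne rest (by simp)] at hidx
          cases hj : PySem.List.index? rest (some k) with
          | none => rw [hj] at hidx; simp at hidx
          | some j' =>
            rw [hj] at hidx
            simp at hidx
            refine ⟨k, j', ?_, hd, hj, ?_⟩
            · simp only [List.mem_cons, not_or]; exact ⟨by simp, hk⟩
            · push_cast at hp ⊢; omega
      | some k0 =>
        cases hv : d.get? k0 with
        | some v0 =>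
          simp only [Option.bind_some, hv, Option.map_some, Option.toList_some,
            List.singleton_append, List.mem_cons]
          rw [ih (i + 1) _ p]
          constructor
          · rintro (rfl | ⟨k, j, hk, hd, hidx, hp⟩)
            · exact ⟨k0, 0, hx, hv, PySem.List.index?_cons_self (some k0) rest, by simp⟩
            · have hkk0 : k ≠ k0 := by
                rintro rfl; exact hk (List.mem_cons_self)
              have hk' : some k ∉ seen := fun h => hk (List.mem_cons_of_mem _ h)
              refine ⟨k, j + 1, hk', hd, ?_, ?_⟩
              · rw [PySem.List.index?_cons_of_ne rest (by simpa using (Ne.symm hkk0)), hidx]; rfl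
              · push_cast at hp ⊢; omega
          · rintro ⟨k, j, hk, hd, hidx, hp⟩
            by_cases hkk0 : k = k0
            · subst hkk0
              rw [PySem.List.index?_cons_self (some k) rest] at hidx
              left
              have hj0 : j = 0 := by injection hidx with h; omega
              subst hj0
              rw [hv] at hd
              have h2 : p.2 = v0 := by injection hd with h; exact h.symm
              have h1 : p.1 = (i : Int) := by rw [hp]; push_cast; ring
              exact Prod.ext_iff.mpr ⟨h1, h2⟩
            · right
              rw [PySem.List.index?_cons_of_ne rest (by simpa using (Ne.symm hkk0))] at hidx
              cases hj : PySem.List.index? rest (some k) with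
              | none => rw [hj] at hidx; simp at hidx
              | some j' =>
                rw [hj] at hidx
                simp at hidx
                refine ⟨k, j', ?_, hd, hj, ?_⟩
                · simp only [List.mem_cons, not_or]
                  exact ⟨by simpa using hkk0, hk⟩
                · push_cast at hp ⊢; omega
        | none =>
          simp only [Option.bind_some, hv, Option.map_none, Option.toList_none, List.nil_append]
          rw [ih (i + 1) _ p]
          constructor
          · rintro ⟨k, j, hk, hd, hidx, hp⟩
            have hkk0 : k ≠ k0 := by
              rintro rfl; exact hk (List.mem_cons_self)
            have hk' : some k ∉ seen := fun h => hk (List.mem_cons_of_mem _ h)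
            refine ⟨k, j + 1, hk', hd, ?_, ?_⟩
            · rw [PySem.List.index?_cons_of_ne rest (by simpa using (Ne.symm hkk0)), hidx]; rfl
            · push_cast at hp ⊢; omega
          · rintro ⟨k, j, hk, hd, hidx, hp⟩
            have hkk0 : k ≠ k0 := by rintro rfl; rw [hv] at hd; simp at hd
            rw [PySem.List.index?_cons_of_ne rest (by simpa using (Ne.symm hkk0))] at hidx
            cases hj : PySem.List.index? rest (some k) with
            | none => rw [hj] at hidx; simp at hidx
            | some j' =>
              rw [hj] at hidx
              simp at hidx
              refine ⟨k, j', ?_, hd, hj, ?_⟩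
              · simp only [List.mem_cons, not_or]
                exact ⟨by simpa using hkk0, hk⟩
              · push_cast at hp ⊢; omega

lemma pvNormalize_valid (e n : String) (h : pvNormalizeEditorType e = some n) :
    n ∈ pvValidList := by
  unfold pvNormalizeEditorType pvValidate at h
  split_ifs at h with h1 h2
  injection h with h3
  subst h3
  simp only [pvValidList, List.mem_cons, List.not_mem_nil, or_false]
  tauto

lemma pvValid_ne_empty (n : String) (h : n ∈ pvValidList) : n ≠ "" := by
  simp only [pvValidList, List.mem_cons, List.not_mem_nil, or_false] at h
  rcases h with rfl | rfl | rfl | rfl | rfl <;> decide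

-- A's fold produces exactly the prompts of pvOcc, given the seen-sets agree on keys with a prompt
lemma pvA_eq (d : PySem.Dict String String) (l : List String) :
    ∀ (i : Nat) (sel : List String) (seenA : PySem.Set String) (seenO : List (Option String)),
      (∀ k, (d.get? k).isSome → (k ∈ seenA ↔ some k ∈ seenO)) →
      (l.foldl (pvStepA d) (sel, seenA)).1 =
        sel ++ (pvOcc d (l.map pvNormalizeEditorType) i seenO).map Prod.snd := by
  induction l with
  | nil => intro i sel seenA seenO _; simp [pvOcc]
  | cons e rest ih =>
    intro i sel seenA seenO H
    simp only [List.foldl_cons, List.map_cons]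
    cases hn : pvNormalizeEditorType e with
    | none =>
      by_cases hx : (none : Option String) ∈ seenO
      · rw [show pvStepA d (sel, seenA) e = (sel, seenA) by simp [pvStepA, hn]]
        rw [ih (i + 1) sel seenA seenO H]
        simp [pvOcc, hx]
      · rw [show pvStepA d (sel, seenA) e = (sel, seenA) by simp [pvStepA, hn]]
        have H' : ∀ k, (d.get? k).isSome → (k ∈ seenA ↔ some k ∈ (none :: seenO)) := by
          intro k hk
          simp only [List.mem_cons]
          rw [H k hk]
          simp
        rw [ih (i + 1) sel seenA _ H']
        simp [pvOcc, hx]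
    | some n =>
      have hval := pvNormalize_valid e n hn
      have hne := pvValid_ne_empty n hval
      cases hv : d.get? n with
      | none =>
        rw [show pvStepA d (sel, seenA) e = (sel, seenA) by simp [pvStepA, hn, hne, hv]]
        by_cases hx : some n ∈ seenO
        · rw [ih (i + 1) sel seenA seenO H]
          simp [pvOcc, hx]
        · have H' : ∀ k, (d.get? k).isSome → (k ∈ seenA ↔ some k ∈ (some n :: seenO)) := by
            intro k hk
            simp only [List.mem_cons]
            rw [H k hk]
            have : k ≠ n := by rintro rfl; rw [hv] at hk; simp at hk
            simp [this]
          rw [ih (i + 1) sel seenA _ H']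
          simp [pvOcc, hx, hv]
      | some v =>
        by_cases hseen : n ∈ seenA
        · have hx : some n ∈ seenO := (H n (by simp [hv])).mp hseen
          rw [show pvStepA d (sel, seenA) e = (sel, seenA) by
            simp [pvStepA, hn, hne, hv, PySem.Set.contains, hseen]]
          rw [ih (i + 1) sel seenA seenO H]
          simp [pvOcc, hx]
        · have hx : some n ∉ seenO := fun h => hseen ((H n (by simp [hv])).mpr h)
          rw [show pvStepA d (sel, seenA) e = (sel ++ [v], seenA.add n) by
            simp [pvStepA, hn, hne, hv, PySem.Set.contains, hseen]]
          have H' : ∀ k, (d.get? k).isSome → (k ∈ seenA.add n ↔ some k ∈ (some n :: seenO)) := by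
            intro k hk
            rw [PySem.Set.mem_add]
            simp only [List.mem_cons]
            rw [H k hk]
            constructor
            · rintro (h | h)
              · exact Or.inr h
              · exact Or.inl (by rw [h])
            · rintro (h | h)
              · injection h with h; exact Or.inr h
              · exact Or.inl h
          rw [ih (i + 1) (sel ++ [v]) _ _ H']
          simp [pvOcc, hx, hv]

-- B's hits loop is a filterMap over the candidate keys
lemma pvHits_eq_filterMap (d : PySem.Dict String String) (nrm : List (Option String)) :
    ∀ (ks : List String) (acc : List (Int × String)),
      ks.foldl (fun hits key => match pvHit d nrm key with
        | some h => hits ++ [h]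
        | none => hits) acc = acc ++ ks.filterMap (pvHit d nrm) := by
  intro ks
  induction ks with
  | nil => intro acc; simp
  | cons k rest ih =>
    intro acc
    simp only [List.foldl_cons, List.filterMap_cons]
    cases hk : pvHit d nrm k with
    | none => rw [ih]
    | some h => rw [ih]; simp

lemma pvHit_eq_some (d : PySem.Dict String String) (nrm : List (Option String))
    (key : String) (p : Int × String) :
    pvHit d nrm key = some p ↔
      d.get? key = some p.2 ∧ ∃ j, PySem.List.index? nrm (some key) = some j ∧ p.1 = (j : Int) := by
  unfold pvHit
  cases hv : d.get? key with
  | none => simp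
  | some v =>
    cases hj : PySem.List.index? nrm (some key) with
    | none => simp
    | some j =>
      constructor
      · intro h
        injection h with h
        subst h
        exact ⟨rfl, j, rfl, rfl⟩
      · rintro ⟨h2, j', hj', h1⟩
        injection hj' with hj'
        subst hj'
        obtain ⟨x1, x2⟩ := p
        simp only at h1 h2
        injection h2 with h2
        rw [h1, h2]

lemma pvHits_nodup (d : PySem.Dict String String) (nrm : List (Option String)) :
    (pvValidList.filterMap (pvHit d nrm)).Nodup := by
  refine List.Nodup.filterMap ?_ (by decide)
  intro a a' b hb hb'
  rw [Option.mem_def, pvHit_eq_some] at hb hb'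
  obtain ⟨_, j, hj, h1⟩ := hb
  obtain ⟨_, j', hj', h1'⟩ := hb'
  have hjj : j = j' := by
    have : (j : Int) = (j' : Int) := by rw [← h1, ← h1']
    exact_mod_cast this
  subst hjj
  obtain ⟨hlt, hget, _⟩ := PySem.List.getElem_of_index?_eq_some hj
  obtain ⟨hlt', hget', _⟩ := PySem.List.getElem_of_index?_eq_some hj'
  have : some a = some a' := by rw [← hget, ← hget']
  injection this

lemma pvOcc_perm_hits (d : PySem.Dict String String) (ns : List (Option String))
    (Hval : ∀ k, some k ∈ ns → k ∈ pvValidList) :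
    (pvOcc d ns 0 []).Perm (pvValidList.filterMap (pvHit d ns)) := by
  rw [List.perm_ext_iff_of_nodup
    ((pvOcc_pairwise d ns 0 []).imp (fun h => by rintro rfl; omega))
    (pvHits_nodup d ns)]
  intro p
  rw [pvOcc_mem d ns 0 [] p, List.mem_filterMap]
  constructor
  · rintro ⟨k, j, _, hd, hidx, hp⟩
    have hmem : some k ∈ ns := by
      have := PySem.List.index?_isSome_iff (xs := ns) (v := some k)
      rw [hidx] at this
      simpa using this
    refine ⟨k, Hval k hmem, ?_⟩
    rw [pvHit_eq_some]
    exact ⟨hd, j, hidx, by rw [hp]; push_cast; ring⟩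
  · rintro ⟨k, _, hk⟩
    rw [pvHit_eq_some] at hk
    obtain ⟨hd, j, hidx, h1⟩ := hk
    exact ⟨k, j, by simp, hd, hidx, by rw [h1]; push_cast; ring⟩

-- ===== VERDICT (by name: the statement is the Claim_ definition above) =====
theorem collect_selected_prompts_py_spec : Claim_equal_collect_selected_prompts_py := by
  intro ets eps _
  unfold Spec_collect_selected_prompts_py
  unfold collect_selected_prompts_py collect_selected_prompts_py_alt
  simp only
  set d := PySem.Dict.mk eps with hd
  set ns := ets.map pvNormalizeEditorType with hns
  have Hval : ∀ k, some k ∈ ns → k ∈ pvValidList := by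
    intro k hk
    rw [hns, List.mem_map] at hk
    obtain ⟨e, _, he⟩ := hk
    exact pvNormalize_valid e k he
  rw [pvHits_eq_filterMap d ns pvValidList []]
  rw [List.nil_append]
  rw [PySem.List.sorted_eq_of_perm_of_pairwise_lt _ _ _
    (pvOcc_perm_hits d ns Hval) (pvOcc_pairwise d ns 0 [])]
  rw [pvA_eq d ets 0 [] PySem.Set.empty [] (by intro k _; simp [PySem.Set.empty])]
  rfl
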